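-- pv_equiv track=rewrite | github.com/canhta/CareCircle | data/crawler/src/integration/ai_assistant_integration.py | format_results_for_ai_assistant
-- ===== SOURCE A (Python) =====
-- from typing import Dict, List, Any, Optional
--
-- def format_results_for_ai_assistant(
--
--     results: List[Dict[str, Any]],
-- ) -> str:
--     """
--     Format search results for AI Assistant consumption.
--
--     Args:
--         results: List of search results
--
--     Returns:
--         Formatted string with healthcare information
--     """
--     if not results:
--         return "No relevant Vietnamese healthcare information found."
--
--     formatted_output = "## Vietnamese Healthcare Information\n\n"
--
--     for i, result in enumerate(results):
--         # Add domain information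
--         domain = result.get("domain", "Unknown")
--         formatted_domain = domain.replace("_", " ").title()
--
--         formatted_output += f"### {formatted_domain} Information\n\n"
--
--         # Add text content
--         text = result.get("text", "").strip()
--         formatted_output += f"{text}\n\n"
--
--         # Add source if available
--         source = result.get("source", "")
--         if source:
--             formatted_output += f"Source: {source}\n\n"
--
--         # Add separator between results
--         if i < len(results) - 1:
--             formatted_output += "---\n\n"
--
--     return formatted_output
-- ===== SOURCE B (Python) =====
-- from typing import Dict, List, Any
--
--
-- def _render_from(results: List[Dict[str, Any]]) -> str:
--     # Recursive: render the head block; a separator appears only when a tail follows.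
--     head, *tail = results
--     formatted_domain = head.get("domain", "Unknown").replace("_", " ").title()
--     text = head.get("text", "").strip()
--     source = head.get("source", "")
--     block = f"### {formatted_domain} Information\n\n{text}\n\n" + (
--         f"Source: {source}\n\n" if source else ""
--     )
--     if not tail:
--         return block
--     return block + "---\n\n" + _render_from(tail)
--
--
-- def format_results_for_ai_assistant(results: List[Dict[str, Any]]) -> str:
--     if not results:
--         return "No relevant Vietnamese healthcare information found."
--     return "## Vietnamese Healthcare Information\n\n" + _render_from(results)
-- ===== Notes on version B (the rewrite author's own statement) =====
-- stated objective: alternative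
-- what changed: Replaces A's indexed accumulator loop (enumerate plus a positional 'i < len-1' separator test) by structural recursion on the list: each call renders one block and decides the separator from whether a tail remains, with no index, no counter and no mutable accumulator.
import Mathlib
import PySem

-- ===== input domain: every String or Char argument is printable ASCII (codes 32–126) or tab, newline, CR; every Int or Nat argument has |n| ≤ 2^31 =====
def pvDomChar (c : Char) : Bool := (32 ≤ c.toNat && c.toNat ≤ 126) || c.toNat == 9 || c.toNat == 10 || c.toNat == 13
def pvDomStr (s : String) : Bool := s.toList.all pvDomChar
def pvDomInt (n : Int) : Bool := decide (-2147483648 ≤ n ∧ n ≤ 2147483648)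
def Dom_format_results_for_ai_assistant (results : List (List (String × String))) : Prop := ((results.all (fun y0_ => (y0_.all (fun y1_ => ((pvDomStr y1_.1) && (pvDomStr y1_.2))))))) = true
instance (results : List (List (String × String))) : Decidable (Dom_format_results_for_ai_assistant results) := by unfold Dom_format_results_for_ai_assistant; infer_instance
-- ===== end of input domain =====

-- B replaces A's indexed accumulator loop by structural recursion on the list, the
-- separator decided by whether a tail remains (objective: alternative decomposition).


-- shared primitives (dict .get with default; str.title, exact on the ASCII domain)
def pvGetD (r : List (String × String)) (k d : String) : String :=
  match r.find? (fun p => p.1 == k) with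
  | some p => p.2
  | none => d

-- str.title on ASCII: a letter is uppercased after a non-letter, lowercased after a letter
def pvTitleChars : List Char → Bool → List Char
  | [], _ => []
  | c :: cs, prevCased =>
      (if PySem.Chars.isalpha c then
        (if prevCased then PySem.Chars.lowerChar c else PySem.Chars.upperChar c)
       else c) :: pvTitleChars cs (PySem.Chars.isalpha c)

def pvTitle (s : String) : String := String.ofList (pvTitleChars s.toList false)

-- ===== PORT A =====
def format_results_for_ai_assistant (results : List (List (String × String))) : String :=
  if results = [] then "No relevant Vietnamese healthcare information found."
  else
    (PySem.List.enumerate results 0).foldl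
      (fun formatted_output p =>
        let result := p.2
        let domain := pvGetD result "domain" "Unknown"
        let formatted_domain := pvTitle (PySem.Str.replace domain "_" " ")
        let formatted_output := formatted_output ++ "### " ++ formatted_domain ++ " Information\n\n"
        let text := PySem.Str.strip (pvGetD result "text" "")
        let formatted_output := formatted_output ++ text ++ "\n\n"
        let source := pvGetD result "source" ""
        let formatted_output :=
          if source ≠ "" then formatted_output ++ "Source: " ++ source ++ "\n\n"
          else formatted_output
        if p.1 < (results.length : Int) - 1 then formatted_output ++ "---\n\n"
        else formatted_output)
      "## Vietnamese Healthcare Information\n\n"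

-- ===== PORT B =====
-- recursion on the list: head's block, then a separator iff a tail remains
def pvRenderFrom : List (List (String × String)) → String
  | [] => ""   -- unreachable: B only calls this on a nonempty list
  | head :: tail =>
      let formatted_domain := pvTitle (PySem.Str.replace (pvGetD head "domain" "Unknown") "_" " ")
      let text := PySem.Str.strip (pvGetD head "text" "")
      let source := pvGetD head "source" ""
      let block := "### " ++ formatted_domain ++ " Information\n\n" ++ text ++ "\n\n"
        ++ (if source ≠ "" then "Source: " ++ source ++ "\n\n" else "")
      if tail = [] then block
      else block ++ "---\n\n" ++ pvRenderFrom tail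

def format_results_for_ai_assistant_alt (results : List (List (String × String))) : String :=
  if results = [] then "No relevant Vietnamese healthcare information found."
  else "## Vietnamese Healthcare Information\n\n" ++ pvRenderFrom results

-- ===== PRECONDITION & SPEC =====
def Spec_format_results_for_ai_assistant (results : List (List (String × String))) (out : String) : Prop := out = format_results_for_ai_assistant_alt results
instance (results : List (List (String × String))) (out : String) : Decidable (Spec_format_results_for_ai_assistant results out) := by unfold Spec_format_results_for_ai_assistant; infer_instance

-- ===== CLAIM =====
def Claim_equal_format_results_for_ai_assistant : Prop := ∀ (results : List (List (String × String))), Dom_format_results_for_ai_assistant results → Spec_format_results_for_ai_assistant results (format_results_for_ai_assistant results)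

-- ===== LEMMAS AND PROOFS =====

theorem str_ext {s t : String} (h : s.toList = t.toList) : s = t := String.toList_inj.mp h

-- one result's block, as plain appends
def pvBlock (r : List (String × String)) : String :=
  "### " ++ pvTitle (PySem.Str.replace (pvGetD r "domain" "Unknown") "_" " ") ++ " Information\n\n"
    ++ PySem.Str.strip (pvGetD r "text" "") ++ "\n\n"
    ++ (if pvGetD r "source" "" ≠ "" then "Source: " ++ pvGetD r "source" "" ++ "\n\n" else "")

-- A's loop body
def pvStep (n : Nat) (acc : String) (p : Int × List (String × String)) : String :=
  let result := p.2
  let domain := pvGetD result "domain" "Unknown"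
  let formatted_domain := pvTitle (PySem.Str.replace domain "_" " ")
  let acc1 := acc ++ "### " ++ formatted_domain ++ " Information\n\n"
  let text := PySem.Str.strip (pvGetD result "text" "")
  let acc2 := acc1 ++ text ++ "\n\n"
  let source := pvGetD result "source" ""
  let acc3 := if source ≠ "" then acc2 ++ "Source: " ++ source ++ "\n\n" else acc2
  if p.1 < (n : Int) - 1 then acc3 ++ "---\n\n" else acc3

theorem pvStep_eq (n : Nat) (acc : String) (p : Int × List (String × String)) :
    pvStep n acc p =
      (acc ++ pvBlock p.2) ++ (if p.1 < (n : Int) - 1 then "---\n\n" else "") := by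
  unfold pvStep pvBlock
  by_cases h : pvGetD p.2 "source" "" = "" <;>
    by_cases h2 : p.1 < (n : Int) - 1 <;>
      simp [h, h2] <;> apply str_ext <;> simp

-- pvRenderFrom of a nonempty list, head block spelled out
theorem pvRenderFrom_cons (r : List (String × String)) (rest : List (List (String × String))) :
    pvRenderFrom (r :: rest) =
      if rest = [] then pvBlock r else pvBlock r ++ "---\n\n" ++ pvRenderFrom rest := by
  rw [pvRenderFrom]
  unfold pvBlock
  by_cases h : rest = []
  · simp [h]
  · simp only [h, if_false]

-- main loop invariant: folding A's body over 'enumerate rest k' (with k + |rest| = n)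
-- appends exactly B's recursive rendering of rest
theorem loop_eq (n : Nat) : ∀ (rest : List (List (String × String))) (k : Nat) (acc : String),
    k + rest.length = n → rest ≠ [] →
    (PySem.List.enumerate rest (k : Int)).foldl (pvStep n) acc
      = acc ++ pvRenderFrom rest := by
  intro rest
  induction rest with
  | nil => intro k acc _ hne; exact absurd rfl hne
  | cons r rest ih =>
    intro k acc hlen _
    rw [show PySem.List.enumerate (r :: rest) (k : Int) = ((k : Int), r) :: PySem.List.enumerate rest ((k : Int) + 1) from rfl]
    rw [List.foldl_cons, pvStep_eq, pvRenderFrom_cons]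
    cases rest with
    | nil =>
      have hk : ¬ ((k : Int) < (n : Int) - 1) := by simp at hlen; omega
      simp [hk, PySem.List.enumerate]
    | cons r2 rest' =>
      have hk : (k : Int) < (n : Int) - 1 := by simp at hlen; omega
      have h1 : ((k : Int) + 1) = ((k + 1 : Nat) : Int) := by push_cast; ring
      rw [h1, ih (k + 1) _ (by simp at hlen ⊢; omega) (by simp)]
      simp only [hk, if_pos, if_neg (by simp : ¬ (r2 :: rest' = []))]
      apply str_ext; simp

-- ===== VERDICT =====
theorem format_results_for_ai_assistant_spec : Claim_equal_format_results_for_ai_assistant := by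
  intro results _
  unfold Spec_format_results_for_ai_assistant format_results_for_ai_assistant format_results_for_ai_assistant_alt
  by_cases h : results = []
  · simp [h]
  · simp only [h, if_false]
    have := loop_eq results.length results 0 "## Vietnamese Healthcare Information\n\n" (by simp) h
    rw [show ((0 : Nat) : Int) = (0 : Int) from rfl] at this
    rw [show (PySem.List.enumerate results 0).foldl
          (fun formatted_output p =>
            let result := p.2
            let domain := pvGetD result "domain" "Unknown"
            let formatted_domain := pvTitle (PySem.Str.replace domain "_" " ")
            let formatted_output := formatted_output ++ "### " ++ formatted_domain ++ " Information\n\n"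
            let text := PySem.Str.strip (pvGetD result "text" "")
            let formatted_output := formatted_output ++ text ++ "\n\n"
            let source := pvGetD result "source" ""
            let formatted_output :=
              if source ≠ "" then formatted_output ++ "Source: " ++ source ++ "\n\n"
              else formatted_output
            if p.1 < (results.length : Int) - 1 then formatted_output ++ "---\n\n"
            else formatted_output)
          "## Vietnamese Healthcare Information\n\n"
        = (PySem.List.enumerate results 0).foldl (pvStep results.length) "## Vietnamese Healthcare Information\n\n" from rfl]
    exact this
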